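-- pv_equiv track=rewrite | github.com/seokcess-kk/contents-creator | domain/composer/naver_formatter.py | _group_into_sections
-- ===== SOURCE A (Python) =====
-- _BLOCK_SECTION = "section"
--
-- _BLOCK_SUBHEADING = "subheading"
--
-- _BLOCK_SPACER = "spacer"
--
-- def _group_into_sections(
--     blocks: list[tuple[str, str]],
-- ) -> list[list[tuple[str, str]]]:
--     """블록을 섹션 그룹으로 나눈다.
--
--     규칙:
--     - SECTION 마커에서 새 섹션 시작
--     - 소제목이 현재 섹션 마지막에 오면 → 다음 섹션으로 이동
--     """
--     sections: list[list[tuple[str, str]]] = [[]]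
--
--     for block_type, html in blocks:
--         if block_type == _BLOCK_SECTION:
--             # 현재 섹션의 마지막이 소제목이면 → 다음 섹션으로 이동
--             trailing = _pop_trailing_heading(sections[-1])
--             sections.append([])
--             if trailing:
--                 sections[-1].extend(trailing)
--             continue
--         sections[-1].append((block_type, html))
--
--     # 빈 섹션 제거
--     return [s for s in sections if s]
--
-- def _pop_trailing_heading(
--     section: list[tuple[str, str]],
-- ) -> list[tuple[str, str]]:
--     """섹션 끝의 소제목 + 스페이서를 잘라내 반환한다."""
--     if not section:
--         return []
--
--     trailing: list[tuple[str, str]] = []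
--     while section and section[-1][0] == _BLOCK_SPACER:
--         trailing.insert(0, section.pop())
--
--     if section and section[-1][0] == _BLOCK_SUBHEADING:
--         trailing.insert(0, section.pop())
--         # 소제목 앞 스페이서도 같이 이동
--         while section and section[-1][0] == _BLOCK_SPACER:
--             trailing.insert(0, section.pop())
--
--     if not any(bt == _BLOCK_SUBHEADING for bt, _ in trailing):
--         # 소제목이 없었으면 원복
--         section.extend(trailing)
--         return []
--
--     return trailing
-- ===== SOURCE B (Python) =====
-- # B: split-then-reshape two-pass — first split blocks at SECTION markers into raw
-- # groups, then sweep boundaries left-to-right moving each group's trailing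
-- # subheading (with adjacent spacers) into the next group, then drop empties.
--
-- def _trailing_heading(g):
--     """Return the trailing subheading-with-adjacent-spacers suffix of g (or [])."""
--     i = len(g)
--     while i > 0 and g[i - 1][0] == "spacer":
--         i -= 1
--     if i > 0 and g[i - 1][0] == "subheading":
--         i -= 1
--         while i > 0 and g[i - 1][0] == "spacer":
--             i -= 1
--         return g[i:]
--     return []
--
--
-- def _group_into_sections(blocks):
--     groups = [[]]
--     for bt, html in blocks:
--         if bt == "section":
--             groups.append([])
--         else:
--             groups[-1].append((bt, html))
--     out = []
--     while len(groups) > 1: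
--         g = groups.pop(0)
--         t = _trailing_heading(g)
--         out.append(g[: len(g) - len(t)])
--         groups[0] = t + groups[0]
--     out.extend(groups)
--     return [s for s in out if s]
-- ===== Notes on version B (the rewrite author's own statement) =====
-- stated objective: alternative
-- what changed: A extracts trailing subheadings inline during a single scan that destructively pops from the current section; B first splits the blocks at SECTION markers into raw groups and then runs a separate left-to-right boundary sweep that moves each group's trailing subheading-with-adjacent-spacers suffix (computed by index arithmetic, no mutation of a shared state list) into the next group before dropping empty groups.
import Mathlib
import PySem

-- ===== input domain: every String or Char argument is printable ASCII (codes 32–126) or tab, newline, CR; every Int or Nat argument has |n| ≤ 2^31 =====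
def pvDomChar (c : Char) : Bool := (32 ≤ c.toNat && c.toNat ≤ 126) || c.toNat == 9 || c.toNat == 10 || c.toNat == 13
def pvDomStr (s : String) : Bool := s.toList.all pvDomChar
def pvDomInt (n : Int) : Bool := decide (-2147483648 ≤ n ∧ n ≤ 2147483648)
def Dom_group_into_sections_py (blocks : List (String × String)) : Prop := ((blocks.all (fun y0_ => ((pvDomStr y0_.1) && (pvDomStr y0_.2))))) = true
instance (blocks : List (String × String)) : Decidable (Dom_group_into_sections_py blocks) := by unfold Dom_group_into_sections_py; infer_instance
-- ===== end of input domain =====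

-- B replaces A's inline-during-scan extraction by a split-at-markers pass followed by a
-- left-to-right boundary sweep moving trailing subheadings (objective: simpler decomposition).

-- ===== PORT A =====
-- the two while-loops of _pop_trailing_heading that pop trailing spacers, as one recursive helper
def pvPopSpacersA (sec tr : List (String × String)) : List (String × String) × List (String × String) :=
  if h : sec ≠ [] ∧ ((sec.getLastD ("", "")).1 == "spacer") = true then
    pvPopSpacersA sec.dropLast (sec.getLastD ("", "") :: tr)
  else (sec, tr)
termination_by sec.length
decreasing_by
  have : 0 < sec.length := List.length_pos_iff.mpr h.1
  simp [List.length_dropLast]; omega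

-- _pop_trailing_heading, returning (mutated section, trailing): phase 2 pops the
-- subheading (with the spacers before it), the finish step restores if no subheading moved
def pvPopPhase2 (p : List (String × String) × List (String × String)) :
    List (String × String) × List (String × String) :=
  if p.1 ≠ [] ∧ ((p.1.getLastD ("", "")).1 == "subheading") = true then
    pvPopSpacersA p.1.dropLast (p.1.getLastD ("", "") :: p.2)
  else p

def pvPopFinish (p : List (String × String) × List (String × String)) :
    List (String × String) × List (String × String) :=
  if p.2.any (fun b => b.1 == "subheading") then p else (p.1 ++ p.2, [])

def pvPopTrailingA (sec : List (String × String)) :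
    List (String × String) × List (String × String) :=
  if sec = [] then (sec, [])
  else pvPopFinish (pvPopPhase2 (pvPopSpacersA sec []))

def group_into_sections_py (blocks : List (String × String)) : List (List (String × String)) :=
  let sections := blocks.foldl
    (fun sections b =>
      if b.1 == "section" then
        -- sections.append([]); sections[-1].extend(trailing)  ⇒ last two groups are (popped, trailing)
        let p := pvPopTrailingA (sections.getLastD [])
        sections.dropLast ++ [p.1, p.2]
      else
        sections.dropLast ++ [(sections.getLastD []) ++ [b]])
    [[]]
  sections.filter (fun s => !s.isEmpty)

-- ===== PORT B =====
-- index-decrementing while loop: skip spacers backwards from position i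
def pvSkipSpacers (g : List (String × String)) (i : Nat) : Nat :=
  if h : 0 < i ∧ ((g.getD (i - 1) ("", "")).1 == "spacer") = true then
    pvSkipSpacers g (i - 1)
  else i
termination_by i
decreasing_by omega

-- _trailing_heading: the trailing subheading-with-adjacent-spacers suffix of g (or [])
def pvTrailing (g : List (String × String)) : List (String × String) :=
  let i := pvSkipSpacers g g.length
  if 0 < i ∧ ((g.getD (i - 1) ("", "")).1 == "subheading") = true then
    g.drop (pvSkipSpacers g (i - 1))
  else []

-- the boundary sweep (B's while loop over groups, emitting `out` front to back)
def pvReshape : List (List (String × String)) → List (List (String × String))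
  | [] => []
  | [g] => [g]
  | g :: g' :: rest =>
    let t := pvTrailing g
    g.take (g.length - t.length) :: pvReshape ((t ++ g') :: rest)
termination_by R => R.length

def group_into_sections_py_alt (blocks : List (String × String)) : List (List (String × String)) :=
  let groups := blocks.foldl
    (fun groups b =>
      if b.1 == "section" then groups ++ [[]]
      else groups.dropLast ++ [(groups.getLastD []) ++ [b]])
    [[]]
  (pvReshape groups).filter (fun s => !s.isEmpty)

-- ===== PRECONDITION & SPEC =====
def Spec_group_into_sections_py (blocks : List (String × String)) (out : List (List (String × String))) : Prop := out = group_into_sections_py_alt blocks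
instance (blocks : List (String × String)) (out : List (List (String × String))) : Decidable (Spec_group_into_sections_py blocks out) := by unfold Spec_group_into_sections_py; infer_instance

-- ===== CLAIM (what is proved, stated in full; the proofs are below) =====
def Claim_equal_group_into_sections_py : Prop := ∀ (blocks : List (String × String)), Dom_group_into_sections_py blocks → Spec_group_into_sections_py blocks (group_into_sections_py blocks)

-- ===== LEMMAS AND PROOFS =====

-- the cut index at which pvTrailing's suffix starts
def pvJ (g : List (String × String)) : Nat :=
  if 0 < pvSkipSpacers g g.length ∧
      ((g.getD (pvSkipSpacers g g.length - 1) ("", "")).1 == "subheading") = true then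
    pvSkipSpacers g (pvSkipSpacers g g.length - 1)
  else g.length

-- generic list facts used below
theorem pv_getLastD_cons {α : Type} (l : List α) (a d : α) (h : l ≠ []) :
    (a :: l).getLastD d = l.getLastD d := by
  rw [List.getLastD_eq_getLast?, List.getLastD_eq_getLast?, List.getLast?_cons]
  have hs : l.getLast?.isSome := List.getLast?_isSome.mpr h
  cases hx : l.getLast? with
  | none => rw [hx] at hs; simp at hs
  | some x => simp

theorem pv_dropLast_take (g : List (String × String)) (i : Nat) (h : i ≤ g.length) :
    (g.take i).dropLast = g.take (i - 1) := by
  rw [List.dropLast_eq_take, List.take_take, List.length_take]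
  congr 1; omega

theorem pv_getLastD_take (g : List (String × String)) (i : Nat) (h0 : 0 < i)
    (h : i ≤ g.length) (d : String × String) :
    (g.take i).getLastD d = g.getD (i - 1) d := by
  have h1 : (g.take i).length = i := by simp; omega
  rw [List.getLastD_eq_getLast?, List.getLast?_eq_getElem?, h1]
  simp only [List.getElem?_take, List.getD]
  rw [if_pos (by omega)]

theorem pv_take_eq (g : List (String × String)) (i : Nat) (h0 : 0 < i) (h : i ≤ g.length)
    (d : String × String) : g.take i = g.take (i - 1) ++ [g.getD (i - 1) d] := by
  have hh : i - 1 < g.length := by omega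
  conv_lhs => rw [show i = (i - 1) + 1 by omega]
  rw [List.take_succ]
  simp [List.getD, List.getElem?_eq_getElem hh]

theorem pv_drop_split (g : List (String × String)) (i j : Nat) (hj : j ≤ i)
    (h : i ≤ g.length) : g.drop j = (g.take i).drop j ++ g.drop i := by
  conv_lhs => rw [← List.take_append_drop i g]
  rw [List.drop_append_of_le_length (by simp; omega)]

theorem pv_drop_pred (g : List (String × String)) (i : Nat) (h0 : 0 < i)
    (h : i ≤ g.length) (d : String × String) :
    g.drop (i - 1) = g.getD (i - 1) d :: g.drop i := by
  have hh : i - 1 < g.length := by omega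
  rw [List.drop_eq_getElem_cons hh]
  congr 1
  · simp [List.getD, List.getElem?_eq_getElem hh]
  · congr 1; omega

theorem pvSkip_le (g : List (String × String)) (i : Nat) : pvSkipSpacers g i ≤ i := by
  fun_induction pvSkipSpacers with
  | case1 h ih => omega
  | case2 h => omega

theorem pvPS (g : List (String × String)) : ∀ i, i ≤ g.length → ∀ tr,
    pvPopSpacersA (g.take i) tr
      = (g.take (pvSkipSpacers g i), (g.take i).drop (pvSkipSpacers g i) ++ tr) := by
  intro i
  induction i using Nat.strong_induction_on with
  | _ i ih =>
    intro hi tr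
    by_cases hc : 0 < i ∧ ((g.getD (i - 1) ("", "")).1 == "spacer") = true
    · have hlast : (g.take i).getLastD ("", "") = g.getD (i - 1) ("", "") :=
        pv_getLastD_take g i hc.1 hi ("", "")
      have hne : g.take i ≠ [] := by
        apply List.ne_nil_of_length_pos; simp; omega
      rw [pvSkipSpacers, dif_pos hc, pvPopSpacersA, dif_pos ⟨hne, by rw [hlast]; exact hc.2⟩]
      rw [pv_dropLast_take g i hi, hlast]
      rw [ih (i - 1) (by omega) (by omega) (g.getD (i - 1) ("", "") :: tr)]
      have hj : pvSkipSpacers g (i - 1) ≤ i - 1 := pvSkip_le g (i - 1)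
      rw [pv_take_eq g i hc.1 hi ("", ""),
        List.drop_append_of_le_length (by simp; omega)]
      simp
    · have hneg : ¬(g.take i ≠ [] ∧ ((g.take i).getLastD ("", "")).1 == "spacer") := by
        rintro ⟨hne, hsp⟩
        have h0 : 0 < i := by
          by_contra hz
          exact hne (by simp [show i = 0 by omega])
        exact hc ⟨h0, by rw [← pv_getLastD_take g i h0 hi ("", "")]; exact hsp⟩
      rw [pvSkipSpacers, dif_neg hc, pvPopSpacersA, dif_neg hneg]
      have hd : (g.take i).drop i = [] := List.drop_eq_nil_of_le (by simp)
      simp [hd]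

theorem pvPS_sp (g : List (String × String)) : ∀ i, i ≤ g.length →
    ∀ x ∈ (g.take i).drop (pvSkipSpacers g i), (x.1 == "spacer") = true := by
  intro i
  induction i using Nat.strong_induction_on with
  | _ i ih =>
    intro hi x hx
    by_cases hc : 0 < i ∧ ((g.getD (i - 1) ("", "")).1 == "spacer") = true
    · rw [pvSkipSpacers, dif_pos hc] at hx
      have hj : pvSkipSpacers g (i - 1) ≤ i - 1 := pvSkip_le g (i - 1)
      rw [pv_take_eq g i hc.1 hi ("", ""),
        List.drop_append_of_le_length (by simp; omega)] at hx
      rcases List.mem_append.mp hx with h1 | h2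
      · exact ih (i - 1) (by omega) (by omega) x h1
      · rw [List.mem_singleton.mp h2]; exact hc.2
    · rw [pvSkipSpacers, dif_neg hc] at hx
      have hd : (g.take i).drop i = [] := List.drop_eq_nil_of_le (by simp)
      rw [hd] at hx
      simp at hx

theorem pvJ_le (g : List (String × String)) : pvJ g ≤ g.length := by
  rw [pvJ]
  have h1 := pvSkip_le g g.length
  have h2 := pvSkip_le g (pvSkipSpacers g g.length - 1)
  split <;> omega

theorem pvPopTrailing_eq (g : List (String × String)) :
    pvPopTrailingA g = (g.take (pvJ g), g.drop (pvJ g)) := by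
  by_cases hg : g = []
  · subst hg
    rw [pvPopTrailingA, if_pos rfl]
    simp
  · have hi : pvSkipSpacers g g.length ≤ g.length := pvSkip_le g g.length
    set i := pvSkipSpacers g g.length with hidef
    have hp1 : pvPopSpacersA g [] = (g.take i, g.drop i) := by
      have h := pvPS g g.length le_rfl []
      rw [List.take_length] at h
      rw [h, List.append_nil]
    rw [pvPopTrailingA, if_neg hg, hp1]
    by_cases hc : 0 < i ∧ ((g.getD (i - 1) ("", "")).1 == "subheading") = true
    · -- trailing subheading present: cut at j = pvSkipSpacers g (i-1)
      have hlast : (g.take i).getLastD ("", "") = g.getD (i - 1) ("", "") :=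
        pv_getLastD_take g i hc.1 hi ("", "")
      have hne : g.take i ≠ [] := by
        apply List.ne_nil_of_length_pos; simp; omega
      set j := pvSkipSpacers g (i - 1) with hjdef
      have hj : j ≤ i - 1 := pvSkip_le g (i - 1)
      have ht2 : (g.take (i - 1)).drop j ++ g.getD (i - 1) ("", "") :: g.drop i
          = g.drop j := by
        rw [pv_drop_split g (i - 1) j hj (by omega), ← pv_drop_pred g i hc.1 hi ("", "")]
      have hph2 : pvPopPhase2 (g.take i, g.drop i) = (g.take j, g.drop j) := by
        rw [pvPopPhase2, if_pos ⟨hne, by rw [hlast]; exact hc.2⟩]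
        show pvPopSpacersA (g.take i).dropLast ((g.take i).getLastD ("", "") :: g.drop i) = _
        rw [pv_dropLast_take g i hi, hlast,
          pvPS g (i - 1) (by omega) (g.getD (i - 1) ("", "") :: g.drop i), ← hjdef, ht2]
      have hany : (g.drop j).any (fun b => b.1 == "subheading") = true := by
        rw [← ht2, List.any_append, List.any_cons, hc.2]
        simp
      have hJ : pvJ g = j := by
        rw [pvJ, ← hidef, if_pos hc]
      rw [hph2, pvPopFinish, hany, hJ]
      simp
    · -- no subheading: trailing is all spacers and gets restored
      have hneg : ¬(g.take i ≠ [] ∧ (((g.take i).getLastD ("", "")).1 == "subheading") = true) := by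
        rintro ⟨hne, hsp⟩
        have h0 : 0 < i := by
          by_contra hz
          exact hne (by simp [show i = 0 by omega])
        exact hc ⟨h0, by rw [← pv_getLastD_take g i h0 hi ("", "")]; exact hsp⟩
      have hph2 : pvPopPhase2 (g.take i, g.drop i) = (g.take i, g.drop i) := by
        rw [pvPopPhase2, if_neg hneg]
      have hsp := pvPS_sp g g.length le_rfl
      rw [List.take_length] at hsp
      have hany : (g.drop i).any (fun b => b.1 == "subheading") = false := by
        rw [List.any_eq_false]
        intro x hx
        have hx1 := eq_of_beq (hsp x hx)
        simp [hx1]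
      have hJ : pvJ g = g.length := by
        rw [pvJ, ← hidef, if_neg hc]
      rw [hph2, pvPopFinish, hany, hJ]
      simp

theorem pvTrailing_eq (g : List (String × String)) : pvTrailing g = g.drop (pvJ g) := by
  rw [pvTrailing, pvJ]
  split
  · rfl
  · rw [List.drop_length]

theorem pv_keep_eq (g : List (String × String)) :
    g.length - (pvTrailing g).length = pvJ g := by
  rw [pvTrailing_eq, List.length_drop]
  have := pvJ_le g
  omega

theorem pvReshape_ne_nil (R : List (List (String × String))) (h : R ≠ []) :
    pvReshape R ≠ [] := by
  match R with
  | [g] => simp [pvReshape]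
  | g :: g' :: rest => simp [pvReshape]

-- appending a fresh empty group = popping the trailing heading off the last reshaped group
theorem pvReshape_append_nil (R' : List (List (String × String))) :
    ∀ g, pvReshape ((g :: R') ++ [[]])
      = (pvReshape (g :: R')).dropLast
        ++ [((pvReshape (g :: R')).getLastD []).take (pvJ ((pvReshape (g :: R')).getLastD [])),
            ((pvReshape (g :: R')).getLastD []).drop (pvJ ((pvReshape (g :: R')).getLastD []))] := by
  induction R' with
  | nil =>
    intro g
    show pvReshape [g, []] = _
    rw [pvReshape, pvReshape, pvReshape]
    rw [pv_keep_eq, pvTrailing_eq, List.append_nil]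
    have hle := pvJ_le g
    simp [List.getLastD]
  | cons g' rest ih =>
    intro g
    show pvReshape (g :: g' :: (rest ++ [[]])) = _
    rw [pvReshape]
    have hstep : pvReshape (g :: g' :: rest)
        = g.take (g.length - (pvTrailing g).length) :: pvReshape ((pvTrailing g ++ g') :: rest) := by
      rw [pvReshape]
    have hM : pvReshape ((pvTrailing g ++ g') :: rest) ≠ [] := pvReshape_ne_nil _ (by simp)
    rw [show ((pvTrailing g ++ g') :: (rest ++ [[]])) = ((pvTrailing g ++ g') :: rest) ++ [[]] by simp]
    rw [ih (pvTrailing g ++ g')]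
    rw [hstep, List.dropLast_cons_of_ne_nil hM, pv_getLastD_cons _ _ _ hM]
    simp

-- appending a block to the last raw group appends it to the last reshaped group
theorem pvReshape_append_last (R' : List (List (String × String))) :
    ∀ g x, pvReshape ((g :: R').dropLast ++ [((g :: R').getLastD []) ++ [x]])
      = (pvReshape (g :: R')).dropLast ++ [((pvReshape (g :: R')).getLastD []) ++ [x]] := by
  induction R' with
  | nil => intro g x; simp [pvReshape]
  | cons g' rest ih =>
    intro g x
    have hM : pvReshape ((pvTrailing g ++ g') :: rest) ≠ [] := pvReshape_ne_nil _ (by simp)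
    have hstep : pvReshape (g :: g' :: rest)
        = g.take (g.length - (pvTrailing g).length) :: pvReshape ((pvTrailing g ++ g') :: rest) := by
      rw [pvReshape]
    have h1 : (g :: g' :: rest).dropLast = g :: (g' :: rest).dropLast :=
      List.dropLast_cons_of_ne_nil (by simp)
    have h2 : (g :: g' :: rest).getLastD ([] : List (String × String))
        = (g' :: rest).getLastD [] := pv_getLastD_cons _ _ _ (by simp)
    rw [h1, h2]
    cases rest with
    | nil =>
      show pvReshape [g, g' ++ [x]] = _
      rw [pvReshape, hstep]
      simp [pvReshape]
    | cons r rs =>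
      have h3 : (g' :: r :: rs).dropLast = g' :: (r :: rs).dropLast :=
        List.dropLast_cons_of_ne_nil (by simp)
      have h4 : (g' :: r :: rs).getLastD ([] : List (String × String))
          = (r :: rs).getLastD [] := pv_getLastD_cons _ _ _ (by simp)
      rw [h3, h4, List.cons_append, List.cons_append, hstep]
      have h7 : (g.take (g.length - (pvTrailing g).length)
            :: pvReshape ((pvTrailing g ++ g') :: r :: rs)).dropLast
          = g.take (g.length - (pvTrailing g).length)
            :: (pvReshape ((pvTrailing g ++ g') :: r :: rs)).dropLast :=
        List.dropLast_cons_of_ne_nil hM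
      have h8 : ((g.take (g.length - (pvTrailing g).length)
            :: pvReshape ((pvTrailing g ++ g') :: r :: rs)).getLastD
              ([] : List (String × String)))
          = (pvReshape ((pvTrailing g ++ g') :: r :: rs)).getLastD [] :=
        pv_getLastD_cons _ _ _ hM
      rw [h7, h8]
      conv_lhs => rw [pvReshape]
      have hIH := ih (pvTrailing g ++ g') x
      have h5 : ((pvTrailing g ++ g') :: r :: rs).dropLast
          = (pvTrailing g ++ g') :: (r :: rs).dropLast :=
        List.dropLast_cons_of_ne_nil (by simp)
      have h6 : (((pvTrailing g ++ g') :: r :: rs).getLastD ([] : List (String × String)))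
          = (r :: rs).getLastD [] := pv_getLastD_cons _ _ _ (by simp)
      rw [h5, h6, List.cons_append] at hIH
      rw [hIH, List.cons_append]

-- the raw-splitting fold never produces an empty list of groups
theorem pvRaw_ne_nil (bs : List (String × String)) :
    ∀ init : List (List (String × String)), init ≠ [] →
      bs.foldl (fun groups b =>
        if b.1 == "section" then groups ++ [[]]
        else groups.dropLast ++ [(groups.getLastD []) ++ [b]]) init ≠ [] := by
  induction bs with
  | nil => intro init h; simpa using h
  | cons b rest ih =>
    intro init h
    rw [List.foldl_cons]
    apply ih
    split <;> simp

-- the heart of the equivalence: A's scan state = reshape of the raw split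
theorem pvState_eq (bs : List (String × String)) :
    bs.foldl (fun sections b =>
        if b.1 == "section" then
          let p := pvPopTrailingA (sections.getLastD [])
          sections.dropLast ++ [p.1, p.2]
        else sections.dropLast ++ [(sections.getLastD []) ++ [b]]) [[]]
      = pvReshape
          (bs.foldl (fun groups b =>
            if b.1 == "section" then groups ++ [[]]
            else groups.dropLast ++ [(groups.getLastD []) ++ [b]]) [[]]) := by
  induction bs using List.reverseRecOn with
  | nil => simp [pvReshape]
  | append_singleton l b ih =>
    rw [List.foldl_append, List.foldl_append, ih]
    have hraw := pvRaw_ne_nil l [[]] (by simp)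
    obtain ⟨g, R', hR⟩ : ∃ g R', (l.foldl (fun groups b =>
        if b.1 == "section" then groups ++ [[]]
        else groups.dropLast ++ [(groups.getLastD []) ++ [b]]) [[]]) = g :: R' := by
      cases h : (l.foldl (fun groups b =>
        if b.1 == "section" then groups ++ [[]]
        else groups.dropLast ++ [(groups.getLastD []) ++ [b]]) [[]]) with
      | nil => exact absurd h hraw
      | cons g0 R0 => exact ⟨g0, R0, rfl⟩
    rw [hR]
    simp only [List.foldl_cons, List.foldl_nil]
    by_cases hb : (b.1 == "section") = true
    · rw [if_pos hb, if_pos hb]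
      rw [pvReshape_append_nil R' g]
      rw [pvPopTrailing_eq]
    · rw [if_neg hb, if_neg hb]
      rw [pvReshape_append_last R' g b]

-- ===== VERDICT (by name: the statement is the Claim_ definition above) =====
theorem group_into_sections_py_spec : Claim_equal_group_into_sections_py := by
  intro blocks _
  unfold Spec_group_into_sections_py
  simp only [group_into_sections_py, group_into_sections_py_alt]
  rw [pvState_eq]
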